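-- pv_equiv track=rewrite | github.com/ideaportriga/magnet-ai | api/src/services/knowledge_graph/chunkers/html_llm_chunker.py | _deduplicate_groups
-- ===== SOURCE A (Python) =====
-- def _deduplicate_groups(
--     all_segment_results: list[list[tuple[str, list[str]]]],
--     all_segment_indices: list[list[int]],
-- ) -> list[tuple[str, list[str]]]:
--     """Deduplicate block groups across overlapping segments.
--
--     For IDs that appear in overlapping regions, prefer the assignment from
--     the LATER segment since it has forward context the earlier one lacked.
--
--     Strategy:
--     1. Process segments in order.
--     2. Track which IDs have been "claimed" by finalized groups.
--     3. For each new segment's groups: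
--        - If a group's IDs are ALL already claimed → skip (duplicate).
--        - If a group has SOME overlap with claimed IDs → the later segment
--          has better context. Remove the overlapping IDs from the earlier
--          group(s) and accept the new group in full.
--        - If no overlap → accept as-is.
--     """
--     if len(all_segment_results) <= 1:
--         return all_segment_results[0] if all_segment_results else []
--
--     # Final list of accepted groups
--     finalized: list[tuple[str, list[str]]] = []
--     # Map from id -> index in finalized
--     id_to_group_idx: dict[str, int] = {}
--
--     for seg_groups in all_segment_results:
--         for title, ids in seg_groups:
--             if not ids:
--                 continue
--
--             # Check overlap with already-claimed IDs
--             overlapping_ids = set(ids) & set(id_to_group_idx.keys())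
--
--             if overlapping_ids == set(ids):
--                 # All IDs already claimed → pure duplicate, skip
--                 continue
--
--             if overlapping_ids:
--                 # Partial overlap: later segment has better context for
--                 # boundary elements. Remove overlapping IDs from earlier
--                 # groups and accept this group.
--                 groups_to_update: set[int] = set()
--                 for oid in overlapping_ids:
--                     if oid in id_to_group_idx:
--                         groups_to_update.add(id_to_group_idx[oid])
--                         del id_to_group_idx[oid]
--
--                 for gidx in groups_to_update:
--                     old_title, old_ids = finalized[gidx]
--                     new_ids = [i for i in old_ids if i not in overlapping_ids]
--                     finalized[gidx] = (old_title, new_ids)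
--
--             # Accept the new group
--             group_idx = len(finalized)
--             finalized.append((title, ids))
--             for uid in ids:
--                 id_to_group_idx[uid] = group_idx
--
--     # Remove groups that became empty after ID removal
--     return [(t, ids) for t, ids in finalized if ids]
-- ===== SOURCE B (Python) =====
-- def _deduplicate_groups(
--     all_segment_results: list[list[tuple[str, list[str]]]],
--     all_segment_indices: list[list[int]],
-- ) -> list[tuple[str, list[str]]]:
--     """Deduplicate block groups across overlapping segments, preferring later
--     segments, via a single ownership map instead of in-place removal loops."""
--     if len(all_segment_results) <= 1:
--         return all_segment_results[0] if all_segment_results else []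
--
--     # Pass 1: accept groups; owner[id] = index of the LAST accepted group containing id.
--     accepted: list[tuple[str, list[str]]] = []
--     owner: dict[str, int] = {}
--     for seg_groups in all_segment_results:
--         for title, ids in seg_groups:
--             if ids and not all(i in owner for i in ids):
--                 idx = len(accepted)
--                 accepted.append((title, ids))
--                 for uid in ids:
--                     owner[uid] = idx
--
--     # Pass 2: materialize — each accepted group keeps exactly the ids it still owns.
--     result: list[tuple[str, list[str]]] = []
--     for idx, (title, ids) in enumerate(accepted):
--         kept = [i for i in ids if owner[i] == idx]
--         if kept:
--             result.append((title, kept))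
--     return result
-- ===== Notes on version B (the rewrite author's own statement) =====
-- stated objective: faster
-- what changed: A rebuilds set(id_to_group_idx.keys()) and runs in-place removal loops over earlier finalized groups on every partial overlap; B does one accept pass that only records a last-owner map id->group index, then a second pass materializing each accepted group with exactly the ids it still owns, dropping emptied groups.
import Mathlib
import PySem

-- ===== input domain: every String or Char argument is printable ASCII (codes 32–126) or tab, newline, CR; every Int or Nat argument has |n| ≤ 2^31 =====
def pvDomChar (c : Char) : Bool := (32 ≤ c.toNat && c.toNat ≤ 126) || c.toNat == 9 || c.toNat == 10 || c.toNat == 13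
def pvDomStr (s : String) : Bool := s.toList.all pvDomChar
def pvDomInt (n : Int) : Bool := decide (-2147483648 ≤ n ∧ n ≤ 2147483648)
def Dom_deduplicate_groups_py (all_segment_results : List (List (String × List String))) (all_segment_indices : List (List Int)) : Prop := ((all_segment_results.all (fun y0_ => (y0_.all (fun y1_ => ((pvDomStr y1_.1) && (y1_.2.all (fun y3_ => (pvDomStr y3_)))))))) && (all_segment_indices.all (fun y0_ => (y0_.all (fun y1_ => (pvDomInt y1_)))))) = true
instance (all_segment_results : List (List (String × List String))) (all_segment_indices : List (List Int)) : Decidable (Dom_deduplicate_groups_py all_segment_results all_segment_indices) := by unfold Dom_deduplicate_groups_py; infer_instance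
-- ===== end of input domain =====

-- B replaces A's per-group rebuild of set(all claimed keys) and its in-place removal
-- loops over earlier finalized groups by one accept pass building a last-owner map plus
-- a final materialization pass (measured faster in a timing run). No mutation of
-- arguments in either version.

-- ===== PORT A =====
-- One body of A's inner loop: state = (finalized, id_to_group_idx).
-- Python iterates over the sets `overlapping_ids` and `groups_to_update` in hash order;
-- the port iterates them in PySem.Set (insertion) order — exact because the loop results
-- (the dict after the erasures, and the independent per-index updates of `finalized`)
-- do not depend on the iteration order.
def aStep (st : List (String × List String) × PySem.Dict String Int)
    (g : String × List String) : List (String × List String) × PySem.Dict String Int :=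
  let finalized := st.1
  let d := st.2
  let title := g.1
  let ids := g.2
  if ids = [] then st
  else
    let overlapping : PySem.Set String :=
      PySem.Set.inter (PySem.Set.ofList ids) (PySem.Set.ofList d.keys)
    if PySem.Set.equal overlapping (PySem.Set.ofList ids) then st
    else
      let (gtu, d') :=
        if overlapping ≠ [] then
          overlapping.foldl
            (fun (st2 : PySem.Set Int × PySem.Dict String Int) oid =>
              match st2.2.get? oid with
              | some gi => (PySem.Set.add st2.1 gi, st2.2.erase oid)
              | none => st2)
            (PySem.Set.empty, d)
        else (PySem.Set.empty, d)
      let finalized' :=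
        gtu.foldl
          (fun fz gidx =>
            let old := PySem.List.pyGetD fz gidx ("", [])
            PySem.List.pySetD fz gidx
              (old.1, old.2.filter (fun i => !(PySem.Set.contains overlapping i))))
          finalized
      let group_idx : Int := finalized'.length
      let finalized'' := finalized' ++ [(title, ids)]
      let d'' := ids.foldl (fun m uid => m.insert uid group_idx) d'
      (finalized'', d'')

def deduplicate_groups_py (all_segment_results : List (List (String × List String))) (all_segment_indices : List (List Int)) : List (String × List String) :=
  if all_segment_results.length ≤ 1 then
    match all_segment_results with
    | [] => []
    | s :: _ => s
  else
    let fin :=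
      all_segment_results.foldl
        (fun st seg_groups => seg_groups.foldl aStep st)
        ([], PySem.Dict.empty)
    fin.1.filter (fun p => !p.2.isEmpty)

-- ===== PORT B =====
-- Pass 1: accept a group iff its ids are nonempty and not all already owned;
-- owner maps each id to the index of the LAST accepted group containing it.
def bAccept (st : List (String × List String) × PySem.Dict String Int)
    (g : String × List String) : List (String × List String) × PySem.Dict String Int :=
  let accepted := st.1
  let owner := st.2
  let ids := g.2
  if ids ≠ [] ∧ ¬ (ids.all (fun i => owner.contains i)) then
    let idx : Int := accepted.length
    (accepted ++ [g], ids.foldl (fun m uid => m.insert uid idx) owner)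
  else st

def deduplicate_groups_py_alt (all_segment_results : List (List (String × List String))) (all_segment_indices : List (List Int)) : List (String × List String) :=
  if all_segment_results.length ≤ 1 then
    match all_segment_results with
    | [] => []
    | s :: _ => s
  else
    let acc :=
      all_segment_results.foldl
        (fun st seg_groups => seg_groups.foldl bAccept st)
        ([], PySem.Dict.empty)
    -- Pass 2: each accepted group keeps exactly the ids it still owns.
    (PySem.List.enumerate acc.1).foldl
      (fun out e =>
        let kept := e.2.2.filter (fun i => acc.2.get? i == some e.1)
        if kept ≠ [] then out ++ [(e.2.1, kept)] else out)
      []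

-- ===== PRECONDITION & SPEC =====
def Spec_deduplicate_groups_py (all_segment_results : List (List (String × List String))) (all_segment_indices : List (List Int)) (out : List (String × List String)) : Prop := out = deduplicate_groups_py_alt all_segment_results all_segment_indices
instance (all_segment_results : List (List (String × List String))) (all_segment_indices : List (List Int)) (out : List (String × List String)) : Decidable (Spec_deduplicate_groups_py all_segment_results all_segment_indices out) := by unfold Spec_deduplicate_groups_py; infer_instance

-- ===== CLAIM (what is proved, stated in full; the proofs are below) =====
def Claim_equal_deduplicate_groups_py : Prop := ∀ (all_segment_results : List (List (String × List String))) (all_segment_indices : List (List Int)), Dom_deduplicate_groups_py all_segment_results all_segment_indices → Spec_deduplicate_groups_py all_segment_results all_segment_indices (deduplicate_groups_py all_segment_results all_segment_indices)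

-- ===== LEMMAS AND PROOFS =====


-- A's state is (finalized, id_to_group_idx); B's is (accepted, owner).  The invariant:
-- same length, the two dicts agree as maps with values Nat-indices below the length, and
-- every finalized entry is the corresponding accepted entry restricted to the ids it owns.
def pvInv (a b : List (String × List String) × PySem.Dict String Int) : Prop :=
  a.1.length = b.1.length ∧
  (∀ k, a.2.get? k = b.2.get? k) ∧
  (∀ k g, b.2.get? k = some g → ∃ n : Nat, g = (n : Int) ∧ n < b.1.length) ∧
  (∀ n : Nat, a.1[n]? =
    (b.1[n]?).map (fun p => (p.1, p.2.filter (fun i => b.2.get? i == some (n : Int)))))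

theorem pv_get?_erase_self {ν : Type} (d : PySem.Dict String ν) (k : String) :
    (d.erase k).get? k = none := by
  simp [PySem.Dict.erase, PySem.Dict.get?, List.find?_eq_none]

theorem pv_get?_erase_of_ne {ν : Type} (d : PySem.Dict String ν) {k k' : String}
    (h : k' ≠ k) : (d.erase k).get? k' = d.get? k' := by
  simp only [PySem.Dict.erase, PySem.Dict.get?]
  congr 1
  induction d.items with
  | nil => rfl
  | cons p t ih =>
    rw [List.filter_cons]
    by_cases hk : p.1 = k
    · have h1 : (p.1 == k') = false := by simp [hk, Ne.symm h]
      simp [hk, h1, ih, Ne.symm h]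
    · by_cases hp : p.1 = k'
      · simp [hk, hp, h]
      · simp [hk, hp, ih]

theorem pv_dict_foldl_insert_const (l : List String) (m : PySem.Dict String Int)
    (v : Int) (k : String) :
    (l.foldl (fun m x => m.insert x v) m).get? k = if k ∈ l then some v else m.get? k := by
  induction l generalizing m with
  | nil => simp
  | cons h t ih =>
    simp only [List.foldl_cons, ih, List.mem_cons]
    by_cases hk : k ∈ t
    · simp [hk]
    · by_cases he : k = h
      · simp [hk, he, PySem.Dict.get?_insert_self]
      · simp [hk, he, PySem.Dict.get?_insert_of_ne _ _ he]

theorem pv_gtu_fold (l : List String) (s : PySem.Set Int) (d : PySem.Dict String Int)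
    (hl : l.Nodup) (hd : ∀ x ∈ l, (d.get? x).isSome) :
    (∀ k, (l.foldl
        (fun (st2 : PySem.Set Int × PySem.Dict String Int) oid =>
          match st2.2.get? oid with
          | some gi => (PySem.Set.add st2.1 gi, st2.2.erase oid)
          | none => st2) (s, d)).2.get? k = if k ∈ l then none else d.get? k) ∧
    (∀ g, g ∈ (l.foldl
        (fun (st2 : PySem.Set Int × PySem.Dict String Int) oid =>
          match st2.2.get? oid with
          | some gi => (PySem.Set.add st2.1 gi, st2.2.erase oid)
          | none => st2) (s, d)).1 ↔ g ∈ s ∨ ∃ oid ∈ l, d.get? oid = some g) ∧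
    (s.Nodup → (l.foldl
        (fun (st2 : PySem.Set Int × PySem.Dict String Int) oid =>
          match st2.2.get? oid with
          | some gi => (PySem.Set.add st2.1 gi, st2.2.erase oid)
          | none => st2) (s, d)).1.Nodup) := by
  induction l generalizing s d with
  | nil => simp
  | cons x t ih =>
    obtain ⟨gx, hgx⟩ := Option.isSome_iff_exists.mp (hd x (by simp))
    have hxt : x ∉ t := (List.nodup_cons.mp hl).1
    have hstep : ∀ y ∈ t, ((d.erase x).get? y).isSome := by
      intro y hy
      rw [pv_get?_erase_of_ne d (by intro he; subst he; exact hxt hy)]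
      exact hd y (by simp [hy])
    obtain ⟨ih1, ih2, ih3⟩ := ih (PySem.Set.add s gx) (d.erase x)
      (List.nodup_cons.mp hl).2 hstep
    refine ⟨?_, ?_, ?_⟩
    · intro k
      simp only [List.foldl_cons, hgx]
      rw [ih1 k]
      by_cases hk : k ∈ t
      · simp [hk]
      · by_cases he : k = x
        · simp [hk, he, pv_get?_erase_self]
        · simp [hk, he, pv_get?_erase_of_ne d he]
    · intro g
      simp only [List.foldl_cons, hgx]
      rw [ih2 g, PySem.Set.mem_add]
      constructor
      · rintro (⟨hs | he⟩ | ⟨oid, hoid, hv⟩)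
        · exact Or.inl hs
        · exact Or.inr ⟨x, by simp, he ▸ hgx⟩
        · refine Or.inr ⟨oid, by simp [hoid], ?_⟩
          rwa [pv_get?_erase_of_ne d (by intro he; subst he; exact hxt hoid)] at hv
      · rintro (hs | ⟨oid, hoid, hv⟩)
        · exact Or.inl (Or.inl hs)
        · rcases List.mem_cons.mp hoid with he | hm
          · subst he; rw [hgx] at hv
            exact Or.inl (Or.inr (Option.some_inj.mp hv).symm)
          · exact Or.inr ⟨oid, hm,
              by rwa [pv_get?_erase_of_ne d (by intro he; subst he; exact hxt hm)]⟩
    · intro hs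
      simp only [List.foldl_cons, hgx]
      exact ih3 (PySem.Set.nodup_add s gx hs)

theorem pv_setd_fold (F : (String × List String) → (String × List String))
    (l : List Int) (fz : List (String × List String))
    (hl : l.Nodup) (hr : ∀ g ∈ l, ∃ n : Nat, g = (n : Int) ∧ n < fz.length) :
    (l.foldl (fun fz g =>
        PySem.List.pySetD fz g (F (PySem.List.pyGetD fz g ("", [])))) fz).length
      = fz.length ∧
    (∀ n : Nat, (l.foldl (fun fz g =>
        PySem.List.pySetD fz g (F (PySem.List.pyGetD fz g ("", [])))) fz)[n]? =
      if (n : Int) ∈ l then (fz[n]?).map F else fz[n]?) := by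
  induction l generalizing fz with
  | nil => simp
  | cons g t ih =>
    obtain ⟨m, rfl, hm⟩ := hr g (by simp)
    have hmt : ((m : Int)) ∉ t := (List.nodup_cons.mp hl).1
    have hfz1 : PySem.List.pySetD fz (m : Int) (F (PySem.List.pyGetD fz (m : Int) ("", [])))
        = fz.set m (F fz[m]) := by
      rw [PySem.List.pySetD_natCast, PySem.List.pyGetD_natCast, List.getD_eq_getElem fz _ hm]
    have hlen1 : (fz.set m (F fz[m])).length = fz.length := by simp
    obtain ⟨ih1, ih2⟩ := ih (fz.set m (F fz[m])) (List.nodup_cons.mp hl).2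
      (fun g hg => by obtain ⟨n, rfl, hn⟩ := hr g (by simp [hg]); exact ⟨n, rfl, hlen1 ▸ hn⟩)
    refine ⟨?_, ?_⟩
    · simp only [List.foldl_cons, hfz1, ih1, hlen1]
    · intro n
      simp only [List.foldl_cons, hfz1]
      rw [ih2 n]
      by_cases ht : (n : Int) ∈ t
      · have hne : n ≠ m := fun he => hmt (he ▸ ht)
        simp [ht, List.getElem?_set, hne, Ne.symm hne]
      · by_cases he : n = m
        · subst he
          simp [ht, List.getElem?_set, hm]
        · simp [ht, he, Ne.symm he, List.getElem?_set]

-- Membership in A's `overlapping` set.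
theorem pv_mem_overlap_iff (ids : List String) (d : PySem.Dict String Int) (i : String) :
    i ∈ PySem.Set.inter (PySem.Set.ofList ids) (PySem.Set.ofList d.keys)
      ↔ i ∈ ids ∧ (d.get? i).isSome := by
  rw [PySem.Set.inter, List.mem_filter, PySem.Set.mem_ofList, PySem.Set.contains,
    List.contains_iff_mem, PySem.Set.mem_ofList, ← PySem.Dict.contains_iff_mem_keys,
    PySem.Dict.contains_eq_isSome_get?]

-- A's skip test on `overlapping` coincides with "every id is a claimed key".
theorem pv_overlap_equal_iff (ids : List String) (d : PySem.Dict String Int) :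
    PySem.Set.equal
        (PySem.Set.inter (PySem.Set.ofList ids) (PySem.Set.ofList d.keys))
        (PySem.Set.ofList ids) = true
      ↔ ∀ i ∈ ids, (d.get? i).isSome := by
  simp only [PySem.Set.equal, PySem.Set.issubset, Bool.and_eq_true, List.all_eq_true,
    PySem.Set.contains, List.contains_iff_mem]
  constructor
  · intro ⟨_, h2⟩ i hi
    exact ((pv_mem_overlap_iff ids d i).mp (h2 i ((PySem.Set.mem_ofList ids i).mpr hi))).2
  · intro h
    constructor
    · intro x hx
      exact (PySem.Set.mem_ofList ids x).mpr ((pv_mem_overlap_iff ids d x).mp hx).1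
    · intro x hx
      have hxi := (PySem.Set.mem_ofList ids x).mp hx
      exact (pv_mem_overlap_iff ids d x).mpr ⟨hxi, h x hxi⟩

theorem pv_step_inv (a b : List (String × List String) × PySem.Dict String Int)
    (g : String × List String) (h : pvInv a b) : pvInv (aStep a g) (bAccept b g) := by
  obtain ⟨hlen, hd, hr, hpt⟩ := h
  by_cases hids : g.2 = []
  · unfold aStep bAccept
    simp [hids]
    exact ⟨hlen, hd, hr, hpt⟩
  · by_cases hall : ∀ i ∈ g.2, (b.2.get? i).isSome
    · -- both skip
      unfold aStep bAccept
      have ha : PySem.Set.equal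
          (PySem.Set.inter (PySem.Set.ofList g.2) (PySem.Set.ofList a.2.keys))
          (PySem.Set.ofList g.2) = true := by
        rw [pv_overlap_equal_iff]; intro i hi; rw [hd i]; exact hall i hi
      have hb : g.2.all (fun i => b.2.contains i) = true := by
        simp only [List.all_eq_true]
        intro i hi
        rw [PySem.Dict.contains_eq_isSome_get?]; exact hall i hi
      simp [hids, ha, hb]
      exact ⟨hlen, hd, hr, hpt⟩
    · -- accept in both
      have ha : PySem.Set.equal
          (PySem.Set.inter (PySem.Set.ofList g.2) (PySem.Set.ofList a.2.keys))
          (PySem.Set.ofList g.2) = false := by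
        rw [Bool.eq_false_iff, Ne, pv_overlap_equal_iff]
        intro hc; exact hall (fun i hi => (hd i) ▸ hc i hi)
      have hb : ¬ (g.2.all (fun i => b.2.contains i) = true) := by
        rw [List.all_eq_true]
        intro hc
        exact hall (fun i hi => by
          rw [← PySem.Dict.contains_eq_isSome_get?]; exact hc i hi)
      unfold aStep bAccept
      simp only [hids, ha, hb, if_neg, not_false_iff, and_true, ite_false, if_true,
        Bool.false_eq_true]
      rw [if_pos (show g.2 ≠ [] from hids)]
      set ov : PySem.Set String :=
        PySem.Set.inter (PySem.Set.ofList g.2) (PySem.Set.ofList a.2.keys) with hovdef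
      have hovmem : ∀ i, i ∈ ov ↔ i ∈ g.2 ∧ (a.2.get? i).isSome :=
        fun i => pv_mem_overlap_iff g.2 a.2 i
      have hovnd : ov.Nodup := List.Nodup.filter _ (PySem.Set.nodup_ofList g.2)
      have hif : (if ov ≠ [] then
            List.foldl (fun (st2 : PySem.Set Int × PySem.Dict String Int) oid =>
              match st2.2.get? oid with
              | some gi => (PySem.Set.add st2.1 gi, st2.2.erase oid)
              | none => st2) (PySem.Set.empty, a.2) ov
          else (PySem.Set.empty, a.2))
          = List.foldl (fun (st2 : PySem.Set Int × PySem.Dict String Int) oid =>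
              match st2.2.get? oid with
              | some gi => (PySem.Set.add st2.1 gi, st2.2.erase oid)
              | none => st2) (PySem.Set.empty, a.2) ov := by
        rcases eq_or_ne ov [] with he | he
        · rw [he]; simp
        · rw [if_pos he]
      rw [hif]
      obtain ⟨hD, hG, hGnd⟩ :=
        pv_gtu_fold ov PySem.Set.empty a.2 hovnd (fun x hx => ((hovmem x).mp hx).2)
      set r := List.foldl (fun (st2 : PySem.Set Int × PySem.Dict String Int) oid =>
              match st2.2.get? oid with
              | some gi => (PySem.Set.add st2.1 gi, st2.2.erase oid)
              | none => st2) (PySem.Set.empty, a.2) ov with hrdef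
      have hGnd' : r.1.Nodup := hGnd List.nodup_nil
      have hG' : ∀ gi : Int, gi ∈ r.1 ↔ ∃ oid ∈ ov, a.2.get? oid = some gi := by
        intro gi; rw [hG gi]; simp [PySem.Set.empty]
      have hrange : ∀ gi ∈ r.1, ∃ n : Nat, gi = (n : Int) ∧ n < a.1.length := by
        intro gi hgi
        obtain ⟨oid, _, hv⟩ := (hG' gi).mp hgi
        obtain ⟨n, rfl, hn⟩ := hr oid gi (by rw [← hd oid]; exact hv)
        exact ⟨n, rfl, by rw [hlen]; exact hn⟩
      obtain ⟨hL, hP⟩ :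
          (List.foldl (fun fz gidx =>
            PySem.List.pySetD fz gidx
              ((PySem.List.pyGetD fz gidx ("", [])).1,
                List.filter (fun i => !(PySem.Set.contains ov i))
                  (PySem.List.pyGetD fz gidx ("", [])).2))
            a.1 r.1).length = a.1.length ∧
          (∀ n : Nat, (List.foldl (fun fz gidx =>
            PySem.List.pySetD fz gidx
              ((PySem.List.pyGetD fz gidx ("", [])).1,
                List.filter (fun i => !(PySem.Set.contains ov i))
                  (PySem.List.pyGetD fz gidx ("", [])).2))
            a.1 r.1)[n]? =
            if (n : Int) ∈ r.1 then
              (a.1[n]?).map (fun p =>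
                (p.1, List.filter (fun i => !(PySem.Set.contains ov i)) p.2))
            else a.1[n]?) :=
        pv_setd_fold
          (fun p => (p.1, List.filter (fun i => !(PySem.Set.contains ov i)) p.2))
          r.1 a.1 hGnd' hrange
      set fin' := List.foldl (fun fz gidx =>
            PySem.List.pySetD fz gidx
              ((PySem.List.pyGetD fz gidx ("", [])).1,
                List.filter (fun i => !(PySem.Set.contains ov i))
                  (PySem.List.pyGetD fz gidx ("", [])).2))
            a.1 r.1 with hfdef
      have hLb : fin'.length = b.1.length := hL.trans hlen
      have hownA : ∀ k, (List.foldl (fun m uid =>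
            m.insert uid (fin'.length : Int)) r.2 g.2).get? k =
          if k ∈ g.2 then some (fin'.length : Int) else r.2.get? k :=
        fun k => pv_dict_foldl_insert_const g.2 r.2 _ k
      have hownB : ∀ k, (List.foldl (fun m uid =>
            m.insert uid (b.1.length : Int)) b.2 g.2).get? k =
          if k ∈ g.2 then some (b.1.length : Int) else b.2.get? k :=
        fun k => pv_dict_foldl_insert_const g.2 b.2 _ k
      refine ⟨by simp [hL, hlen], ?_, ?_, ?_⟩
      · -- dicts agree
        intro k
        rw [hownA k, hownB k]
        by_cases hk : k ∈ g.2
        · simp [hk, hLb]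
        · rw [if_neg hk, if_neg hk, hD k]
          have hkov : k ∉ ov := fun hko => hk ((hovmem k).mp hko).1
          rw [if_neg hkov]
          exact hd k
      · -- value range
        intro k gi hgi
        rw [hownB k] at hgi
        by_cases hk : k ∈ g.2
        · rw [if_pos hk] at hgi
          exact ⟨b.1.length, (Option.some_inj.mp hgi).symm, by simp⟩
        · rw [if_neg hk] at hgi
          obtain ⟨n, rfl, hn⟩ := hr k gi hgi
          exact ⟨n, rfl, by simp; omega⟩
      · -- pointwise
        intro n
        rcases lt_trichotomy n b.1.length with hn | hn | hn
        · have hnF : n < fin'.length := by rw [hLb]; exact hn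
          rw [List.getElem?_append_left hnF, List.getElem?_append_left hn, hP n]
          have hbn : b.1[n]? = some (b.1[n]) := List.getElem?_eq_getElem hn
          have hptn := hpt n
          rw [hbn] at hptn
          rw [hbn, hptn]
          have hnL : (n : Int) ≠ (b.1.length : Int) := by
            exact_mod_cast Nat.ne_of_lt hn
          by_cases hg : (n : Int) ∈ r.1
          · rw [if_pos hg]
            simp only [Option.map_some, Option.some_inj]
            rw [List.filter_filter]
            refine congrArg _ ?_
            apply List.filter_congr
            intro i _
            rw [hownB i]
            have hRF : ((b.1.length : Int) == (n : Int)) = false :=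
              beq_eq_false_iff_ne.mpr (Ne.symm hnL)
            by_cases h1 : b.2.get? i = some (n : Int)
            · have hT : (b.2.get? i == some (n : Int)) = true := beq_iff_eq.mpr h1
              have hsomeA : (a.2.get? i).isSome := by rw [hd i, h1]; simp
              by_cases h2 : i ∈ g.2
              · have hiov : i ∈ ov := (hovmem i).mpr ⟨h2, hsomeA⟩
                simp [hT, h2, hiov, hRF, PySem.Set.contains]
              · have hiov : i ∉ ov := fun h => h2 ((hovmem i).mp h).1
                simp [hT, h2, hiov, PySem.Set.contains]
            · have hF : (b.2.get? i == some (n : Int)) = false :=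
                beq_eq_false_iff_ne.mpr h1
              by_cases h2 : i ∈ g.2
              · simp [hF, h2, hRF]
              · simp [hF, h2]
          · rw [if_neg hg]
            simp only [Option.map_some, Option.some_inj]
            refine congrArg _ ?_
            apply List.filter_congr
            intro i _
            rw [hownB i]
            have hRF : ((b.1.length : Int) == (n : Int)) = false :=
              beq_eq_false_iff_ne.mpr (Ne.symm hnL)
            by_cases h2 : i ∈ g.2
            · have h1 : b.2.get? i ≠ some (n : Int) := by
                intro h1
                have hsomeA : (a.2.get? i).isSome := by rw [hd i, h1]; simp
                exact hg ((hG' _).mpr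
                  ⟨i, (hovmem i).mpr ⟨h2, hsomeA⟩, by rw [hd i]; exact h1⟩)
              have hF : (b.2.get? i == some (n : Int)) = false :=
                beq_eq_false_iff_ne.mpr h1
              simp [hF, h2, hRF]
            · simp [h2]
        · have e1 : (fin' ++ [(g.1, g.2)])[n]? = some (g.1, g.2) := by
            rw [hn, ← hLb]; simp
          have e2 : (b.1 ++ [g])[n]? = some g := by rw [hn]; simp
          rw [e1, e2]
          simp only [Option.map_some, Option.some_inj]
          have hfil : g.2.filter (fun i =>
              (List.foldl (fun m uid => m.insert uid (b.1.length : Int)) b.2 g.2).get? i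
                == some (n : Int)) = g.2 :=
            List.filter_eq_self.mpr (fun i hi => by rw [hownB i, if_pos hi, hn]; simp)
          rw [hfil]
        · have e1 : (fin' ++ [(g.1, g.2)])[n]? = none := by
            rw [List.getElem?_eq_none] <;> simp [hLb] <;> omega
          have e2 : (b.1 ++ [g])[n]? = none := by
            rw [List.getElem?_eq_none] <;> simp <;> omega
          rw [e1, e2]
          rfl
  
theorem pv_fold_inner (l : List (String × List String))
    (a b : List (String × List String) × PySem.Dict String Int) (h : pvInv a b) :
    pvInv (l.foldl aStep a) (l.foldl bAccept b) := by
  induction l generalizing a b with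
  | nil => exact h
  | cons g t ih => exact ih _ _ (pv_step_inv a b g h)

theorem pv_fold_outer (ll : List (List (String × List String)))
    (a b : List (String × List String) × PySem.Dict String Int) (h : pvInv a b) :
    pvInv (ll.foldl (fun st seg => seg.foldl aStep st) a)
          (ll.foldl (fun st seg => seg.foldl bAccept st) b) := by
  induction ll generalizing a b with
  | nil => exact h
  | cons seg t ih => exact ih _ _ (pv_fold_inner seg a b h)

theorem pv_inv_init :
    pvInv ([], (PySem.Dict.empty : PySem.Dict String Int))
          ([], (PySem.Dict.empty : PySem.Dict String Int)) := by
  refine ⟨rfl, fun k => rfl, fun k g h => ?_, fun n => rfl⟩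
  rw [PySem.Dict.get?_empty] at h
  exact absurd h (by simp)

-- B's materialization pass over `enumerate` reproduces A's final non-empty filter.
theorem pv_final_aux (own : PySem.Dict String Int)
    (l fa : List (String × List String)) (s : Int)
    (h : ∀ n : Nat, fa[n]? = (l[n]?).map (fun p =>
      (p.1, p.2.filter (fun i => own.get? i == some (s + (n : Int))))))
    (out : List (String × List String)) :
    (PySem.List.enumerate l s).foldl (fun out e =>
        if (e.2.2.filter (fun i => own.get? i == some e.1)) ≠ [] then
          out ++ [(e.2.1, e.2.2.filter (fun i => own.get? i == some e.1))]
        else out) out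
      = out ++ fa.filter (fun p => !p.2.isEmpty) := by
  induction l generalizing fa s out with
  | nil =>
    have hfa : fa = [] := by
      have h0 := h 0
      simp only [List.getElem?_nil, Option.map_none] at h0
      rcases fa with _ | ⟨f, fs⟩
      · rfl
      · simp at h0
    subst hfa
    simp [PySem.List.enumerate]
  | cons x xs ih =>
    rcases fa with _ | ⟨f0, fa'⟩
    · exfalso
      have h0 := h 0
      simp at h0
    · have h0 := h 0
      simp only [List.getElem?_cons_zero, Option.map_some, Nat.cast_zero, add_zero,
        Option.some_inj] at h0
      have h' : ∀ n : Nat, fa'[n]? = (xs[n]?).map (fun p =>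
          (p.1, p.2.filter (fun i => own.get? i == some ((s + 1) + (n : Int))))) := by
        intro n
        have hn := h (n + 1)
        simp only [List.getElem?_cons_succ] at hn
        have harith : s + ((n : Int) + 1) = (s + 1) + (n : Int) := by ring
        push_cast at hn
        rw [harith] at hn
        exact hn
      rw [show PySem.List.enumerate (x :: xs) s
            = (s, x) :: PySem.List.enumerate xs (s + 1) from rfl]
      rw [List.foldl_cons, ih fa' (s + 1) h']
      subst h0
      by_cases hk : x.2.filter (fun i => own.get? i == some s) = []
      · simp only [hk]
        simp [List.filter_cons, hk]
      · simp only [hk]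
        simp [List.filter_cons, hk, List.append_assoc]

-- ===== VERDICT (by name: the statement is the Claim_ definition above) =====
theorem deduplicate_groups_py_spec : Claim_equal_deduplicate_groups_py := by
  intro rs idxs _
  unfold Spec_deduplicate_groups_py deduplicate_groups_py deduplicate_groups_py_alt
  by_cases hl : rs.length ≤ 1
  · simp [hl]
  · rw [if_neg hl, if_neg hl]
    have hinv := pv_fold_outer rs ([], PySem.Dict.empty) ([], PySem.Dict.empty) pv_inv_init
    obtain ⟨hlen, hd, hr, hpt⟩ := hinv
    have h : ∀ n : Nat,
        (rs.foldl (fun st seg => seg.foldl aStep st) ([], PySem.Dict.empty)).1[n]? =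
        ((rs.foldl (fun st seg => seg.foldl bAccept st) ([], PySem.Dict.empty)).1[n]?).map
          (fun p => (p.1, p.2.filter (fun i =>
            (rs.foldl (fun st seg => seg.foldl bAccept st)
              ([], PySem.Dict.empty)).2.get? i == some ((0 : Int) + (n : Int))))) := by
      intro n
      have := hpt n
      simpa using this
    have := pv_final_aux
      (rs.foldl (fun st seg => seg.foldl bAccept st) ([], PySem.Dict.empty)).2
      (rs.foldl (fun st seg => seg.foldl bAccept st) ([], PySem.Dict.empty)).1
      (rs.foldl (fun st seg => seg.foldl aStep st) ([], PySem.Dict.empty)).1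
      0 h []
    simpa using this.symm
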